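-- pv_equiv track=rewrite | github.com/Lesley55/AdventOfCode | 2016/13/part1.py | isOpen
-- ===== SOURCE A (Python) =====
-- input = 1358
--
-- def isOpen(x, y):
--     number = (x * x) + (3 * x) + (2 * x * y) + y + (y * y)
--     number += input
--     binary = bin(number)
--     one = 0
--     for b in binary:
--         if b == "1":
--             one += 1
--     return one % 2 == 0
-- ===== SOURCE B (Python) =====
-- input = 1358
--
-- def isOpen(x, y):
--     number = (x * x) + (3 * x) + (2 * x * y) + y + (y * y) + input
--     n = abs(number)
--     parity = 0
--     while n:
--         parity ^= 1
--         n &= n - 1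
--     return parity == 0
-- ===== Notes on version B (the rewrite author's own statement) =====
-- stated objective: alternative
-- what changed: B replaces building the binary string and scanning every character of it with Brian Kernighan's bit trick: it keeps only a parity flag and clears the lowest set bit (n &= n-1) once per set bit, never materialising a string.
import Mathlib
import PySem

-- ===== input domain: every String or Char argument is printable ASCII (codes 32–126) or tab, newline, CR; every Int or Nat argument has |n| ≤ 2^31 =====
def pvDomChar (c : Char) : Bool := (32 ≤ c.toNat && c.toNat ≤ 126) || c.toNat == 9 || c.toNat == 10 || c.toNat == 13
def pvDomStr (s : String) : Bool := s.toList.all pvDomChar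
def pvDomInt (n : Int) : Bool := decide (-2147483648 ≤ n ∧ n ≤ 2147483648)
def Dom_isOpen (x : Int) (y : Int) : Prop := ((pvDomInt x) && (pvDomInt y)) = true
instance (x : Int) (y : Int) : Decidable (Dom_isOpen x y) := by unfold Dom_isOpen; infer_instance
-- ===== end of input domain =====

-- B replaces A's binary-string build-and-scan with Kernighan's lowest-set-bit clearing loop
-- that maintains only a parity flag (objective: alternative algorithm, no string built).

-- ===== PORT A =====
-- A: build bin(number) and count the '1' characters of the string, then test the count's parity.
def isOpen (x : Int) (y : Int) : Bool :=
  let number : Int := (x * x) + (3 * x) + (2 * x * y) + y + (y * y) + 1358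
  let binary : String := PySem.Int.pyBin number
  let one : Int := binary.toList.foldl (fun one b => if b == '1' then one + 1 else one) 0
  PySem.Int.mod one 2 == 0

-- ===== PORT B =====
-- Kernighan loop: flip parity and clear the lowest set bit until n = 0.
-- Termination: n &&& (n - 1) ≤ n - 1 < n when n ≠ 0 (Nat.and_le_right).
def isOpenKern (n : Nat) (parity : Int) : Int :=
  if n = 0 then parity
  else isOpenKern (n &&& (n - 1)) (PySem.Int.bxor parity 1)
termination_by n
decreasing_by
  have h := @Nat.and_le_right n (n - 1)
  omega

def isOpen_alt (x : Int) (y : Int) : Bool :=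
  let number : Int := (x * x) + (3 * x) + (2 * x * y) + y + (y * y) + 1358
  isOpenKern number.natAbs 0 == 0

-- ===== PRECONDITION & SPEC =====
def Spec_isOpen (x : Int) (y : Int) (out : Bool) : Prop := out = isOpen_alt x y
instance (x : Int) (y : Int) (out : Bool) : Decidable (Spec_isOpen x y out) := by unfold Spec_isOpen; infer_instance

-- ===== CLAIM (what is proved, stated in full; the proofs are below) =====
def Claim_equal_isOpen : Prop := ∀ (x : Int) (y : Int), Dom_isOpen x y → Spec_isOpen x y (isOpen x y)

-- ===== LEMMAS AND PROOFS =====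

/-- Popcount by halving, the common yardstick both sides are reduced to. -/
def pvOnes (n : Nat) : Nat :=
  if n = 0 then 0 else n % 2 + pvOnes (n / 2)
termination_by n
decreasing_by exact Nat.div_lt_self (by omega) (by omega)

theorem pvOnes_eq (n : Nat) : pvOnes n = n % 2 + pvOnes (n / 2) := by
  rw [pvOnes]
  split
  · subst ‹n = 0›; rw [pvOnes]; simp
  · rfl

theorem pvOnes_zero : pvOnes 0 = 0 := by rw [pvOnes]; simp

theorem pvOnes_one : pvOnes 1 = 1 := by rw [pvOnes_eq, pvOnes_zero]

/-- Count of '1' characters in the base-2 digit string equals popcount. -/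
theorem count_toDigits_two (n : Nat) :
    (Nat.toDigits 2 n).count '1' = pvOnes n := by
  induction n using Nat.strong_induction_on with
  | _ n ih =>
    rw [Nat.toDigits_eq_if (by norm_num)]
    by_cases h : n < 2
    · interval_cases n
      · rw [pvOnes_zero]; decide
      · rw [pvOnes_one]; decide
    · simp only [if_neg h, List.count_append]
      rw [ih (n / 2) (Nat.div_lt_self (by omega) (by omega)), pvOnes_eq n]
      have h2 : n % 2 = 0 ∨ n % 2 = 1 := Nat.mod_two_eq_zero_or_one n
      rcases h2 with h2 | h2 <;> (rw [h2]; simp [Nat.digitChar]; try omega)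

/-- Clearing the lowest set bit removes exactly one 1-bit. -/
theorem pvOnes_and_pred (n : Nat) (hn : n ≠ 0) :
    pvOnes (n &&& (n - 1)) + 1 = pvOnes n := by
  induction n using Nat.strong_induction_on with
  | _ n ih =>
    have hmod : ((n &&& (n - 1)) % 2 = 1 ↔ n % 2 = 1 ∧ (n - 1) % 2 = 1) :=
      Nat.and_mod_two_eq_one
    rcases Nat.mod_two_eq_zero_or_one n with he | ho
    · -- n even, n > 0: recurse on n / 2
      have hand : (n &&& (n - 1)) % 2 = 0 := by
        rcases Nat.mod_two_eq_zero_or_one (n &&& (n - 1)) with h | h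
        · exact h
        · exact absurd (hmod.mp h).1 (by omega)
      have hdiv : (n - 1) / 2 = n / 2 - 1 := by omega
      have h2 : n / 2 ≠ 0 := by omega
      have hrec := ih (n / 2) (Nat.div_lt_self (by omega) (by omega)) h2
      rw [pvOnes_eq (n &&& (n - 1)), hand, Nat.and_div_two, hdiv, pvOnes_eq n, he]
      omega
    · -- n odd: n &&& (n-1) has even bottom bit and half n / 2 &&& n / 2 = n / 2
      have hand : (n &&& (n - 1)) % 2 = 0 := by
        rcases Nat.mod_two_eq_zero_or_one (n &&& (n - 1)) with h | h
        · exact h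
        · exact absurd (hmod.mp h).2 (by omega)
      have hdiv : (n - 1) / 2 = n / 2 := by omega
      rw [pvOnes_eq (n &&& (n - 1)), hand, Nat.and_div_two, hdiv, Nat.and_self,
        pvOnes_eq n, ho]
      omega

/-- The Kernighan loop computes the popcount's parity, offset by the carried flag. -/
theorem isOpenKern_eq (n : Nat) (p : Int) (hp : p = 0 ∨ p = 1) :
    isOpenKern n p = (((p.toNat + pvOnes n) % 2 : Nat) : Int) := by
  induction n using Nat.strong_induction_on generalizing p with
  | _ n ih =>
    rw [isOpenKern]
    split
    · subst ‹n = 0›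
      rw [pvOnes]
      rcases hp with h | h <;> subst h <;> simp
    · rename_i hn
      have hlt : n &&& (n - 1) < n := by
        have h := @Nat.and_le_right n (n - 1); omega
      have hones := pvOnes_and_pred n hn
      rcases hp with h | h <;> subst h
      · rw [show PySem.Int.bxor 0 1 = 1 by decide,
          ih (n &&& (n - 1)) hlt 1 (Or.inr rfl)]
        congr 1; omega
      · rw [show PySem.Int.bxor 1 1 = 0 by decide,
          ih (n &&& (n - 1)) hlt 0 (Or.inl rfl)]
        congr 1; omega

/-- Counting the '1' characters of bin(number) gives the popcount of |number|
    (the '0b' / '-0b' prefix contributes nothing). -/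
theorem count_pyBin (n : Int) :
    (PySem.Int.pyBin n).toList.count '1' = pvOnes n.natAbs := by
  rw [PySem.Int.toList_pyBin]
  unfold PySem.Int.toBinChars0b
  split
  · rename_i h
    simp [count_toDigits_two]
  · rename_i h
    have ht : n.toNat = n.natAbs := by omega
    rw [ht]
    simp [count_toDigits_two]

/-- Both sides reduced to the popcount parity of |number|. -/
theorem pvMain (number : Int) :
    (PySem.Int.mod ((PySem.Int.pyBin number).toList.foldl
        (fun one b => if b == '1' then one + 1 else one) 0) 2 == 0)
      = (isOpenKern number.natAbs 0 == 0) := by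
  -- A's counter is the '1'-count of the binary string
  rw [PySem.List.foldl_count_if (fun b => b == '1') (PySem.Int.pyBin number).toList 0]
  rw [show List.countP (fun b => b == '1') (PySem.Int.pyBin number).toList
        = (PySem.Int.pyBin number).toList.count '1' from rfl]
  rw [count_pyBin]
  -- B's loop is the popcount parity
  rw [isOpenKern_eq number.natAbs 0 (Or.inl rfl)]
  rw [show (2 : Int) = ((2 : Nat) : Int) from rfl]
  simp only [zero_add, Int.toNat_zero, PySem.Int.mod_natCast]

-- ===== VERDICT (by name: the statement is the Claim_ definition above) =====
theorem isOpen_spec : Claim_equal_isOpen := by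
  intro x y _
  unfold Spec_isOpen isOpen isOpen_alt
  exact pvMain ((x * x) + (3 * x) + (2 * x * y) + y + (y * y) + 1358)
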